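-- pv_equiv track=rewrite | github.com/annieycchiu/sf311-airflow-kafka-etl-pipeline | streamlit/helpers/visualizations.py | generate_color_list
-- ===== SOURCE A (Python) =====
-- def generate_color_list(colors, num):
--     """
--     Generate a list of colors based on the input list of colors.
--     If the length of the input color list is smaller than the input num,
--     it will loop from the beginning until the length of the colors matches the num.
--
--     Args:
--       - colors (list): List of color codes.
--       - num (int): Number of colors to generate.
--
--     Returns:
--       - list: List containing generated colors based on the input list.
--     """
--     if num <= 0:
--         return []
--
--     input_colors_len = len(colors)
--     result_colors = []
--     index = 0
--
--     while len(result_colors) < num: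
--         pos = index % input_colors_len
--         result_colors.append(colors[pos])
--         index += 1
--
--     return result_colors
-- ===== SOURCE B (Python) =====
-- def generate_color_list(colors, num):
--     if num <= 0:
--         return []
--     reps = num // len(colors) + 1
--     return (colors * reps)[:num]
-- ===== Notes on version B (the rewrite author's own statement) =====
-- stated objective: simpler
-- what changed: Replaces the element-by-element while-loop with index bookkeeping by computing the needed repeat count, multiplying the list, and slicing its first num elements.
import Mathlib
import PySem

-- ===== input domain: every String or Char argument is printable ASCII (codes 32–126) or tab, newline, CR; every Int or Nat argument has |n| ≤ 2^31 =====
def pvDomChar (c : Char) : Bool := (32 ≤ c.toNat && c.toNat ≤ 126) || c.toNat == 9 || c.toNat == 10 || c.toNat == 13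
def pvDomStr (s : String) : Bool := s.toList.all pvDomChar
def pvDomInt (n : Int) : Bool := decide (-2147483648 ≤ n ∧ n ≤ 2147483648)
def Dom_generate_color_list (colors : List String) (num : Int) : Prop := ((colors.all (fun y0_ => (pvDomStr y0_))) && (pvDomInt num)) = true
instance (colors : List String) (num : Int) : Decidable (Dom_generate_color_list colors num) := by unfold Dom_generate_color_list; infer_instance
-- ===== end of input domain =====

-- B replaces A's element-wise while-loop with a multiply-and-slice (simpler decomposition, same cost).

-- ===== PORT A =====
-- while len(result_colors) < num: append colors[index % len(colors)]; index += 1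
-- (pyGet? none is unreachable inside Pre_; colors = [] with num > 0, where Python
-- raises ZeroDivisionError at 'index % input_colors_len', is excluded by Pre_)
def pvLoopA (colors : List String) (num : Int) (result : List String) (index : Int) :
    List String :=
  if _h : (result.length : Int) < num then
    match PySem.List.pyGet? colors (PySem.Int.mod index (colors.length : Int)) with
    | some c => pvLoopA colors num (result ++ [c]) (index + 1)
    | none => result
  else result
termination_by (num - (result.length : Int)).toNat
decreasing_by simp; omega

def generate_color_list (colors : List String) (num : Int) : List String :=
  if num ≤ 0 then []
  else pvLoopA colors num [] 0

-- ===== PORT B =====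
-- reps = num // len(colors) + 1;  return (colors * reps)[:num]
def generate_color_list_alt (colors : List String) (num : Int) : List String :=
  if num ≤ 0 then []
  else
    let reps := PySem.Int.floordiv num (colors.length : Int) + 1
    PySem.List.slice ((List.replicate reps.toNat colors).flatten) none (some num)

-- ===== PRECONDITION & SPEC =====
-- Pre_ excludes colors = [] with num > 0, where A (and B) raise ZeroDivisionError.
def Pre_generate_color_list (colors : List String) (num : Int) : Prop :=
  colors ≠ [] ∨ num ≤ 0
instance (colors : List String) (num : Int) : Decidable (Pre_generate_color_list colors num) := by
  unfold Pre_generate_color_list; infer_instance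
def pvWitness_generate_color_list : List String × Int := (["#ff0000", "#00ff00"], 5)

def Spec_generate_color_list (colors : List String) (num : Int) (out : List String) : Prop := out = generate_color_list_alt colors num
instance (colors : List String) (num : Int) (out : List String) : Decidable (Spec_generate_color_list colors num out) := by unfold Spec_generate_color_list; infer_instance

-- ===== CLAIM (what is proved, stated in full; the proofs are below) =====
def Claim_equal_generate_color_list : Prop := ∀ (colors : List String) (num : Int), Dom_generate_color_list colors num → Pre_generate_color_list colors num → Spec_generate_color_list colors num (generate_color_list colors num)

-- ===== LEMMAS AND PROOFS =====

-- A's loop appends colors[(index+j) % n] for j = 0 .. k-1.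
lemma pvLoopA_eq (colors : List String) (hne : colors ≠ []) (num : Int) :
    ∀ (k : Nat) (result : List String) (index : Nat),
      num - (result.length : Int) = (k : Int) →
      pvLoopA colors num result index =
        result ++ (List.range k).map
          (fun j => colors[(index + j) % colors.length]!) := by
  intro k
  induction k with
  | zero =>
    intro result index hk
    rw [pvLoopA]
    simp only [List.range_zero, List.map_nil, List.append_nil]
    rw [dif_neg (by omega)]
  | succ k ih =>
    intro result index hk
    have hn : 0 < colors.length := List.length_pos_of_ne_nil hne
    rw [pvLoopA, dif_pos (by omega)]
    have hmod : PySem.Int.mod (index : Int) (colors.length : Int)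
        = ((index % colors.length : Nat) : Int) := by
      exact_mod_cast PySem.Int.mod_natCast index colors.length
    have hlt : index % colors.length < colors.length := Nat.mod_lt _ hn
    have hget : PySem.List.pyGet? colors (PySem.Int.mod (index : Int) (colors.length : Int))
        = some (colors[index % colors.length]!) := by
      rw [hmod, PySem.List.pyGet?_natCast, List.getElem?_eq_getElem hlt,
        List.getElem!_eq_getElem?_getD, List.getElem?_eq_getElem hlt]
      rfl
    rw [hget]
    dsimp only
    have hrec := ih (result ++ [colors[index % colors.length]!]) (index + 1)
      (by simp; omega)
    push_cast at hrec
    rw [hrec, List.range_succ_eq_map]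
    simp only [List.map_cons, List.map_map, List.append_assoc, List.singleton_append,
      Nat.add_zero]
    congr 1
    congr 1
    apply List.map_congr_left
    intro j _
    simp only [Function.comp_apply, Nat.succ_eq_add_one]
    rw [show index + 1 + j = index + (j + 1) from by omega]

-- B's multiplied list is the same cyclic map over range (reps * n).
lemma flatten_replicate_eq (colors : List String) (hne : colors ≠ []) :
    ∀ (r : Nat),
      (List.replicate r colors).flatten =
        (List.range (r * colors.length)).map (fun j => colors[j % colors.length]!) := by
  intro r
  have hn : 0 < colors.length := List.length_pos_of_ne_nil hne
  induction r with
  | zero => simp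
  | succ r ih =>
    rw [List.replicate_succ, List.flatten_cons, ih]
    have : (r + 1) * colors.length = colors.length + r * colors.length := by ring
    rw [this, List.range_add, List.map_append]
    congr 1
    · apply List.ext_getElem (by simp)
      intro i h1 h2
      simp at h2 ⊢
      rw [Nat.mod_eq_of_lt h2]
      simp [List.getElem?_eq_getElem h2]
    · rw [List.map_map]
      apply List.map_congr_left
      intro j _
      simp [Function.comp, Nat.add_mod_left]

theorem generate_color_list_spec : Claim_equal_generate_color_list := by
  intro colors num _ hpre
  unfold Spec_generate_color_list generate_color_list generate_color_list_alt
  by_cases h0 : num ≤ 0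
  · simp [h0]
  · rw [if_neg h0, if_neg h0]
    have hne : colors ≠ [] := by
      rcases hpre with h | h
      · exact h
      · omega
    have hn : 0 < colors.length := List.length_pos_of_ne_nil hne
    have hnI : (0 : Int) < (colors.length : Int) := by exact_mod_cast hn
    -- A side
    have hA := pvLoopA_eq colors hne num num.toNat [] 0 (by simp; omega)
    norm_num at hA
    rw [hA]
    dsimp only
    -- B side
    rw [flatten_replicate_eq colors hne]
    have hdiv : PySem.Int.floordiv num (colors.length : Int) = num / (colors.length : Int) :=
      PySem.Int.floordiv_eq_ediv_of_pos hnI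
    have hmod0 := Int.emod_nonneg num (by omega : (colors.length : Int) ≠ 0)
    have hmod1 := Int.emod_lt_of_pos num hnI
    have hdm := Int.mul_ediv_add_emod num (colors.length : Int)
    have hq0 : 0 ≤ num / (colors.length : Int) := by
      apply Int.ediv_nonneg <;> omega
    have hle : num.toNat ≤ (PySem.Int.floordiv num (colors.length : Int) + 1).toNat
        * colors.length := by
      rw [hdiv]
      zify
      rw [Int.toNat_of_nonneg (by omega), Int.toNat_of_nonneg (by omega)]
      nlinarith
    have hnum : num = ((num.toNat : Nat) : Int) := by omega
    rw [hnum, PySem.List.slice_to_natCast, ← List.map_take, List.take_range, ← hnum,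
      Nat.min_eq_left hle]
    simp [List.getElem!_eq_getElem?_getD]
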